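-- pv_equiv track=rewrite | github.com/itsPeetah/aoc-2025 | python/day_4.py | find_accessible_rolls
-- ===== SOURCE A (Python) =====
-- def find_accessible_rolls(rolls: list[int], columns: int) -> tuple[int, list[int]]:
--     rows = len(rolls) // columns
--
--     def get_value_at(col: int, row: int) -> int:
--         valid_col = col >= 0 and col < columns
--         valid_row = row >= 0 and row < rows
--         if not valid_col or not valid_row:
--             return 0
--         return rolls[columns * row + col]
--
--     def convolute(center_col: int, center_row: int) -> int:
--         neighbours = 0
--         for i in range(-1, 2):
--             for j in range(-1, 2):
--                 if i == 0 and j == 0: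
--                     continue
--                 neighbours += get_value_at(center_col + i, center_row + j)
--         return neighbours
--
--     cum_sum = 0
--     rows = len(rolls) // columns
--     new_gen = []
--     for y in range(rows):
--         for x in range(columns):
--             roll_value = get_value_at(x, y)
--             if roll_value > 0 and convolute(x, y) < 4:
--                 cum_sum += 1
--                 roll_value = 0
--             new_gen.append(roll_value)
--     return cum_sum, new_gen
-- ===== SOURCE B (Python) =====
-- def find_accessible_rolls(rolls: list[int], columns: int) -> tuple[int, list[int]]:
--     rows = len(rolls) // columns
--     # horizontal pass: hor[y][x] = sum of row y's cells x-1..x+1 (missing cells count 0)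
--     hor = []
--     for y in range(rows):
--         base = y * columns
--         row = []
--         for x in range(columns):
--             s = rolls[base + x]
--             if x > 0:
--                 s += rolls[base + x - 1]
--             if x < columns - 1:
--                 s += rolls[base + x + 1]
--             row.append(s)
--         hor.append(row)
--     # vertical pass: 8-neighbour sum = hor[y-1][x] + hor[y][x] + hor[y+1][x] - centre
--     count = 0
--     new_gen = []
--     for y in range(rows):
--         for x in range(columns):
--             v = rolls[y * columns + x]
--             nsum = hor[y][x] - v
--             if y > 0:
--                 nsum += hor[y - 1][x]
--             if y < rows - 1:
--                 nsum += hor[y + 1][x]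
--             if v > 0 and nsum < 4:
--                 count += 1
--                 new_gen.append(0)
--             else:
--                 new_gen.append(v)
--     return count, new_gen
-- ===== Notes on version B (the rewrite author's own statement) =====
-- stated objective: faster
-- what changed: Replaces the per-cell 3x3 bounds-checked neighbour scan with a separable convolution: one pass precomputes horizontal 3-window row sums, a second pass gets each 8-neighbour sum from three table reads minus the centre.
import Mathlib
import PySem

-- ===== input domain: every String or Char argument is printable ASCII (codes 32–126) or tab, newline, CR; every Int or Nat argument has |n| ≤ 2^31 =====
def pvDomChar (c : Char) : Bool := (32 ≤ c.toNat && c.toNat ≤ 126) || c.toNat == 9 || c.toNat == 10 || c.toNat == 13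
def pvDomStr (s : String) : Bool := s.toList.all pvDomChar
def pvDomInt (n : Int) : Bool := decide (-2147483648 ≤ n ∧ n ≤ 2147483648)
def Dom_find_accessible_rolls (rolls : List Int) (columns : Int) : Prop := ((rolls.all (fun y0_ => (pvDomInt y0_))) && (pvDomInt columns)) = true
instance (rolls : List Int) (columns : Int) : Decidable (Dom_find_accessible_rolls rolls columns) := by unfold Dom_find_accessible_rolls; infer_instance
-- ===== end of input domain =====

-- B replaces A's per-cell 3x3 bounds-checked neighbour scan by a separable convolution
-- (one pass precomputes horizontal 3-window row sums, a second pass reads three table entries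
-- per cell and subtracts the centre): an alternative decomposition of the same neighbour count.


-- ===== PORT A =====
-- Python's nested 'def get_value_at', lifted to a top-level helper over its closure (rolls, columns, rows).
-- rolls[columns*row+col] is ported with pyGetD 0: under Pre_ (columns ≠ 0) the index is provably in
-- range whenever this branch is reached, so the default is never taken where the Python returns.
def pvA_get_value_at (rolls : List Int) (columns rows col row : Int) : Int :=
  if ¬(0 ≤ col ∧ col < columns) ∨ ¬(0 ≤ row ∧ row < rows) then 0
  else PySem.List.pyGetD rolls (columns * row + col) 0

-- Python's nested 'def convolute': double loop over range(-1, 2)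
def pvA_convolute (rolls : List Int) (columns rows center_col center_row : Int) : Int :=
  (PySem.List.pyRange (-1) 2 1).foldl (fun neighbours i =>
    (PySem.List.pyRange (-1) 2 1).foldl (fun neighbours j =>
      if i = 0 ∧ j = 0 then neighbours
      else neighbours + pvA_get_value_at rolls columns rows (center_col + i) (center_row + j))
      neighbours) 0

def find_accessible_rolls (rolls : List Int) (columns : Int) : Int × List Int :=
  let rows := PySem.Int.floordiv (rolls.length : Int) columns
  (PySem.List.pyRange 0 rows 1).foldl (fun st y =>
    (PySem.List.pyRange 0 columns 1).foldl (fun st x =>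
      let roll_value := pvA_get_value_at rolls columns rows x y
      if roll_value > 0 ∧ pvA_convolute rolls columns rows x y < 4
      then (st.1 + 1, st.2 ++ [(0 : Int)])
      else (st.1, st.2 ++ [roll_value])) st)
    ((0 : Int), ([] : List Int))

-- ===== PORT B =====
-- pyGetD 0 for rolls[...] : as in port A, the index is provably in range wherever the Python evaluates it.
def find_accessible_rolls_alt (rolls : List Int) (columns : Int) : Int × List Int :=
  let rows := PySem.Int.floordiv (rolls.length : Int) columns
  -- horizontal pass: hor[y][x] = sum of row y's cells x-1..x+1 (missing cells count 0)
  let hor : List (List Int) :=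
    (PySem.List.pyRange 0 rows 1).foldl (fun hor y =>
      let base := y * columns
      let row :=
        (PySem.List.pyRange 0 columns 1).foldl (fun row x =>
          let s := PySem.List.pyGetD rolls (base + x) 0
          let s := if x > 0 then s + PySem.List.pyGetD rolls (base + x - 1) 0 else s
          let s := if x < columns - 1 then s + PySem.List.pyGetD rolls (base + x + 1) 0 else s
          row ++ [s]) []
      hor ++ [row]) []
  -- vertical pass: 8-neighbour sum = hor[y-1][x] + hor[y][x] + hor[y+1][x] - centre
  (PySem.List.pyRange 0 rows 1).foldl (fun st y =>
    (PySem.List.pyRange 0 columns 1).foldl (fun st x =>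
      let v := PySem.List.pyGetD rolls (y * columns + x) 0
      let nsum := PySem.List.pyGetD (PySem.List.pyGetD hor y []) x 0 - v
      let nsum := if y > 0 then nsum + PySem.List.pyGetD (PySem.List.pyGetD hor (y - 1) []) x 0 else nsum
      let nsum := if y < rows - 1 then nsum + PySem.List.pyGetD (PySem.List.pyGetD hor (y + 1) []) x 0 else nsum
      if v > 0 ∧ nsum < 4
      then (st.1 + 1, st.2 ++ [(0 : Int)])
      else (st.1, st.2 ++ [v])) st)
    ((0 : Int), ([] : List Int))

-- ===== PRECONDITION & SPEC =====
-- Pre_ excludes exactly columns = 0, where Python A raises ZeroDivisionError at len(rolls)//columns (B raises there too).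
def Pre_find_accessible_rolls (rolls : List Int) (columns : Int) : Prop := columns ≠ 0
instance (rolls : List Int) (columns : Int) : Decidable (Pre_find_accessible_rolls rolls columns) := by unfold Pre_find_accessible_rolls; infer_instance
def pvWitness_find_accessible_rolls : List Int × Int := ([1, 0, 1, 1, 2, 0], 3)

def Spec_find_accessible_rolls (rolls : List Int) (columns : Int) (out : Int × List Int) : Prop := out = find_accessible_rolls_alt rolls columns
instance (rolls : List Int) (columns : Int) (out : Int × List Int) : Decidable (Spec_find_accessible_rolls rolls columns out) := by unfold Spec_find_accessible_rolls; infer_instance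

-- ===== CLAIM (what is proved, stated in full; the proofs are below) =====
def Claim_equal_find_accessible_rolls : Prop := ∀ (rolls : List Int) (columns : Int), Dom_find_accessible_rolls rolls columns → Pre_find_accessible_rolls rolls columns → Spec_find_accessible_rolls rolls columns (find_accessible_rolls rolls columns)

-- ===== LEMMAS AND PROOFS =====

-- closed form of one entry of B's horizontal table
def pvHv (rolls : List Int) (columns y x : Int) : Int :=
  (PySem.List.pyGetD rolls (y * columns + x) 0)
  + (if x > 0 then PySem.List.pyGetD rolls (y * columns + x - 1) 0 else 0)
  + (if x < columns - 1 then PySem.List.pyGetD rolls (y * columns + x + 1) 0 else 0)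

-- a horizontal-window entry of a valid row is the 3-term sum of A's bounds-checked reads
theorem pvHv_eq_row3 (rolls : List Int) (columns rows y x : Int)
    (hy : 0 ≤ y ∧ y < rows) (hx : 0 ≤ x ∧ x < columns) :
    pvHv rolls columns y x =
      pvA_get_value_at rolls columns rows (x - 1) y
      + pvA_get_value_at rolls columns rows x y
      + pvA_get_value_at rolls columns rows (x + 1) y := by
  simp only [pvHv, pvA_get_value_at]
  have e1 : columns * y + (x - 1) = y * columns + x - 1 := by ring
  have e2 : columns * y + x = y * columns + x := by ring
  have e3 : columns * y + (x + 1) = y * columns + x + 1 := by ring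
  rw [e1, e2, e3]
  split_ifs <;> first | (exfalso; omega) | ring

-- on an invalid row all three of A's bounds-checked reads vanish
theorem pvRow3_zero (rolls : List Int) (columns rows y x : Int)
    (hy : ¬(0 ≤ y ∧ y < rows)) :
    pvA_get_value_at rolls columns rows (x - 1) y
      + pvA_get_value_at rolls columns rows x y
      + pvA_get_value_at rolls columns rows (x + 1) y = 0 := by
  simp only [pvA_get_value_at]
  rw [if_pos (Or.inr hy), if_pos (Or.inr hy), if_pos (Or.inr hy)]; ring

-- A's convolute unrolled to the explicit 8-neighbour sum
theorem pvConvolute_eq (rolls : List Int) (columns rows x y : Int) :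
    pvA_convolute rolls columns rows x y =
      (pvA_get_value_at rolls columns rows (x - 1) (y - 1)
        + pvA_get_value_at rolls columns rows x (y - 1)
        + pvA_get_value_at rolls columns rows (x + 1) (y - 1))
      + (pvA_get_value_at rolls columns rows (x - 1) y
        + pvA_get_value_at rolls columns rows (x + 1) y)
      + (pvA_get_value_at rolls columns rows (x - 1) (y + 1)
        + pvA_get_value_at rolls columns rows x (y + 1)
        + pvA_get_value_at rolls columns rows (x + 1) (y + 1)) := by
  unfold pvA_convolute
  have hr : PySem.List.pyRange (-1) 2 1 = [-1, 0, 1] := by decide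
  rw [hr]
  norm_num [List.foldl]
  ring_nf

-- indexing B's horizontal table (its fold rewritten to a double map) yields pvHv
theorem pvHor_lookup (rolls : List Int) (columns R y x : Int)
    (h0 : 0 ≤ y) (h1 : y < R) (h2 : 0 ≤ x) (h3 : x < columns) :
    PySem.List.pyGetD (PySem.List.pyGetD (List.map (fun yy => List.map (fun xx =>
      if xx < columns - 1 then
        (if xx > 0 then PySem.List.pyGetD rolls (yy * columns + xx) 0 + PySem.List.pyGetD rolls (yy * columns + xx - 1) 0
         else PySem.List.pyGetD rolls (yy * columns + xx) 0) + PySem.List.pyGetD rolls (yy * columns + xx + 1) 0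
      else (if xx > 0 then PySem.List.pyGetD rolls (yy * columns + xx) 0 + PySem.List.pyGetD rolls (yy * columns + xx - 1) 0
         else PySem.List.pyGetD rolls (yy * columns + xx) 0)) (PySem.List.pyRange 0 columns 1)) (PySem.List.pyRange 0 R 1)) y []) x 0
    = pvHv rolls columns y x := by
  rw [PySem.List.pyGetD_map_pyRange_of_nonneg _ _ _ _ h0 h1,
      PySem.List.pyGetD_map_pyRange_of_nonneg _ _ _ _ h2 h3]
  simp only [pvHv]
  split_ifs <;> ring

theorem pv_main (rolls : List Int) (columns : Int) :
    find_accessible_rolls rolls columns = find_accessible_rolls_alt rolls columns := by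
  unfold find_accessible_rolls find_accessible_rolls_alt
  simp only [PySem.List.foldl_append_singleton_eq_map, List.nil_append]
  generalize PySem.Int.floordiv ((rolls.length : Int)) columns = R
  apply PySem.List.foldl_congr_mem
  intro st y hy
  rw [PySem.List.mem_pyRange_one] at hy
  apply PySem.List.foldl_congr_mem
  intro st' x hx
  rw [PySem.List.mem_pyRange_one] at hx
  have hgv : pvA_get_value_at rolls columns R x y = PySem.List.pyGetD rolls (y * columns + x) 0 := by
    simp only [pvA_get_value_at]
    rw [if_neg (by omega)]
    ring_nf
  by_cases hgt : y > 0 <;> by_cases hlt : y < R - 1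
  · rw [if_pos hlt, if_pos hgt,
        pvHor_lookup rolls columns R y x hy.1 hy.2 hx.1 hx.2,
        pvHor_lookup rolls columns R (y - 1) x (by omega) (by omega) hx.1 hx.2,
        pvHor_lookup rolls columns R (y + 1) x (by omega) (by omega) hx.1 hx.2]
    have hs : pvA_convolute rolls columns R x y =
        pvHv rolls columns y x - PySem.List.pyGetD rolls (y * columns + x) 0
          + pvHv rolls columns (y - 1) x + pvHv rolls columns (y + 1) x := by
      rw [pvConvolute_eq,
          pvHv_eq_row3 rolls columns R y x hy hx,
          pvHv_eq_row3 rolls columns R (y - 1) x ⟨by omega, by omega⟩ hx,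
          pvHv_eq_row3 rolls columns R (y + 1) x ⟨by omega, by omega⟩ hx,
          ← hgv]
      ring
    rw [hgv, hs]
  · rw [if_neg hlt, if_pos hgt,
        pvHor_lookup rolls columns R y x hy.1 hy.2 hx.1 hx.2,
        pvHor_lookup rolls columns R (y - 1) x (by omega) (by omega) hx.1 hx.2]
    have hs : pvA_convolute rolls columns R x y =
        pvHv rolls columns y x - PySem.List.pyGetD rolls (y * columns + x) 0
          + pvHv rolls columns (y - 1) x := by
      rw [pvConvolute_eq,
          pvHv_eq_row3 rolls columns R y x hy hx,
          pvHv_eq_row3 rolls columns R (y - 1) x ⟨by omega, by omega⟩ hx,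
          ← hgv]
      linear_combination pvRow3_zero rolls columns R (y + 1) x (by omega)
    rw [hgv, hs]
  · rw [if_pos hlt, if_neg hgt,
        pvHor_lookup rolls columns R y x hy.1 hy.2 hx.1 hx.2,
        pvHor_lookup rolls columns R (y + 1) x (by omega) (by omega) hx.1 hx.2]
    have hs : pvA_convolute rolls columns R x y =
        pvHv rolls columns y x - PySem.List.pyGetD rolls (y * columns + x) 0
          + pvHv rolls columns (y + 1) x := by
      rw [pvConvolute_eq,
          pvHv_eq_row3 rolls columns R y x hy hx,
          pvHv_eq_row3 rolls columns R (y + 1) x ⟨by omega, by omega⟩ hx,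
          ← hgv]
      linear_combination pvRow3_zero rolls columns R (y - 1) x (by omega)
    rw [hgv, hs]
  · rw [if_neg hlt, if_neg hgt,
        pvHor_lookup rolls columns R y x hy.1 hy.2 hx.1 hx.2]
    have hs : pvA_convolute rolls columns R x y =
        pvHv rolls columns y x - PySem.List.pyGetD rolls (y * columns + x) 0 := by
      rw [pvConvolute_eq,
          pvHv_eq_row3 rolls columns R y x hy hx,
          ← hgv]
      linear_combination pvRow3_zero rolls columns R (y - 1) x (by omega)
        + pvRow3_zero rolls columns R (y + 1) x (by omega)
    rw [hgv, hs]

-- ===== VERDICT (by name: the statement is the Claim_ definition above) =====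
theorem find_accessible_rolls_spec : Claim_equal_find_accessible_rolls := by
  intro rolls columns _ _
  unfold Spec_find_accessible_rolls
  exact pv_main rolls columns
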